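-- pv_equiv track=rewrite | github.com/LuisL36/mlb_web_scraping_dashboard | dashboard.py | is_team_or_garbage
-- ===== SOURCE A (Python) =====
-- team_keywords = [
--     "Yankees", "Dodgers", "Giants", "Red Sox", "White Sox", "Braves", "Pirates",
--     "Cardinals", "Phillies", "Senators", "Athletics", "Cubs", "Indians",
--     "Orioles", "Mets", "Padres", "Royals", "Angels", "Mariners", "Tigers", "Twins"
-- ]
--
-- junk_keywords = ["Statistic", "Stat", "Stats", "Statistics"]
--
-- def is_team_or_garbage(stat_name: str):
--     if not isinstance(stat_name, str) or stat_name.strip() == "":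
--         return True
--     if stat_name.strip().title() in junk_keywords:
--         return True
--     if len(stat_name) > 30:
--         return True
--     for kw in team_keywords:
--         if kw.lower() in stat_name.lower():
--             return True
--     return False
-- ===== SOURCE B (Python) =====
-- team_keywords = [
--     "Yankees", "Dodgers", "Giants", "Red Sox", "White Sox", "Braves", "Pirates",
--     "Cardinals", "Phillies", "Senators", "Athletics", "Cubs", "Indians",
--     "Orioles", "Mets", "Padres", "Royals", "Angels", "Mariners", "Tigers", "Twins"
-- ]
--
-- junk_keywords = ["Statistic", "Stat", "Stats", "Statistics"]
--
-- _LOWERED = [kw.lower() for kw in team_keywords]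
--
-- def is_team_or_garbage(stat_name: str):
--     if not isinstance(stat_name, str):
--         return True
--     stripped = stat_name.strip()
--     if stripped == "" or stripped.title() in junk_keywords or len(stat_name) > 30:
--         return True
--     low = stat_name.lower()
--     # one left-to-right pass over positions: at each position test whether some
--     # (pre-lowered) team keyword starts there
--     return any(
--         any(low.startswith(kw, i) for kw in _LOWERED)
--         for i in range(len(low))
--     )
-- ===== Notes on version B (the rewrite author's own statement) =====
-- stated objective: alternative
-- what changed: The per-keyword loop of 21 separate case-insensitive substring scans is replaced by a single left-to-right pass over the lowered string that, at each position, tests the pre-lowered keywords as prefixes; the three guards are folded into one combined early return and the string is stripped/lowered once.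
import Mathlib
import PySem

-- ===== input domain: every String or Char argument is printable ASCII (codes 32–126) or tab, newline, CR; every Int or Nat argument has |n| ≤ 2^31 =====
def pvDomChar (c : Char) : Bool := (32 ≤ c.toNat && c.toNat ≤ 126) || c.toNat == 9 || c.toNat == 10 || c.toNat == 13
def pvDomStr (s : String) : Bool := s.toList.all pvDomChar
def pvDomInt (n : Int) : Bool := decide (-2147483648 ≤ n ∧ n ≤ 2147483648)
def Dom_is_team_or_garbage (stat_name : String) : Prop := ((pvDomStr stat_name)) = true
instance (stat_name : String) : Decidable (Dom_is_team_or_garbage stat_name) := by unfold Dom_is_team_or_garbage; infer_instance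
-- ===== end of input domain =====

-- B replaces A's 21 per-keyword substring scans by one left-to-right pass over the
-- lowered string, testing pre-lowered keywords as prefixes at each position (alternative).

-- ===== PORT A =====
def teamKeywords : List String := [
    "Yankees", "Dodgers", "Giants", "Red Sox", "White Sox", "Braves", "Pirates",
    "Cardinals", "Phillies", "Senators", "Athletics", "Cubs", "Indians",
    "Orioles", "Mets", "Padres", "Royals", "Angels", "Mariners", "Tigers", "Twins"]

def junkKeywords : List String := ["Statistic", "Stat", "Stats", "Statistics"]

-- str.title() ported by hand (PySem has no title): uppercase a letter after a
-- non-letter, lowercase a letter after a letter; exact on the ASCII domain, where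
-- Python's "cased" characters are exactly the letters.
def pyTitle (s : List Char) : List Char :=
  (s.foldl (fun (p : List Char × Bool) c =>
      if PySem.Chars.isalpha c then
        (p.1 ++ [if p.2 then PySem.Chars.lowerChar c else PySem.Chars.upperChar c], true)
      else (p.1 ++ [c], false)) ([], false)).1

-- the for-loop with early return over team_keywords
def loopA : List String → List Char → Bool
  | [], _ => false
  | kw :: rest, s =>
    if PySem.Chars.isIn (PySem.Chars.lower kw.toList) (PySem.Chars.lower s) then true
    else loopA rest s

def is_team_or_garbage (stat_name : String) : Bool :=
  let s := stat_name.toList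
  if PySem.Chars.strip s == [] then true
  else if (junkKeywords.map String.toList).contains (pyTitle (PySem.Chars.strip s)) then true
  else if s.length > 30 then true
  else loopA teamKeywords s

-- ===== PORT B =====
def loweredKeywords : List (List Char) :=
  teamKeywords.map (fun kw => PySem.Chars.lower kw.toList)

def is_team_or_garbage_alt (stat_name : String) : Bool :=
  let s := stat_name.toList
  let stripped := PySem.Chars.strip s
  if stripped == [] || (junkKeywords.map String.toList).contains (pyTitle stripped)
      || s.length > 30 then true
  else
    let low := PySem.Chars.lower s
    -- range(len(low)) ported as List.range low.length
    (List.range low.length).any (fun i =>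
      loweredKeywords.any (fun kw => PySem.Chars.startswith (low.drop i) kw))

-- ===== PRECONDITION & SPEC =====
def Spec_is_team_or_garbage (stat_name : String) (out : Bool) : Prop := out = is_team_or_garbage_alt stat_name
instance (stat_name : String) (out : Bool) : Decidable (Spec_is_team_or_garbage stat_name out) := by unfold Spec_is_team_or_garbage; infer_instance

-- ===== CLAIM (what is proved, stated in full; the proofs are below) =====
def Claim_equal_is_team_or_garbage : Prop := ∀ (stat_name : String), Dom_is_team_or_garbage stat_name → Spec_is_team_or_garbage stat_name (is_team_or_garbage stat_name)

-- ===== LEMMAS AND PROOFS =====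

theorem loopA_eq_any (kws : List String) (s : List Char) :
    loopA kws s = kws.any (fun kw => PySem.Chars.isIn (PySem.Chars.lower kw.toList) (PySem.Chars.lower s)) := by
  induction kws with
  | nil => rfl
  | cons kw rest ih =>
    simp [loopA, List.any_cons, ih]

theorem lowered_ne_nil : ∀ kw ∈ teamKeywords, PySem.Chars.lower kw.toList ≠ [] := by decide

theorem scan_eq (s : List Char) :
    loopA teamKeywords s =
      (List.range (PySem.Chars.lower s).length).any (fun i =>
        loweredKeywords.any (fun kw => PySem.Chars.startswith ((PySem.Chars.lower s).drop i) kw)) := by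
  rw [loopA_eq_any]
  apply Bool.eq_iff_iff.mpr
  simp only [List.any_eq_true, loweredKeywords, List.mem_map, List.mem_range,
    PySem.Chars.isIn_iff_infix, PySem.Chars.startswith_iff]
  constructor
  · rintro ⟨kw, hkw, hinf⟩
    obtain ⟨j, hj⟩ := (PySem.Chars.exists_prefix_drop_iff_isIn
        (PySem.Chars.lower kw.toList) (PySem.Chars.lower s)).2
      ((PySem.Chars.isIn_iff_infix _ _).2 hinf)
    have hjlt : j < (PySem.Chars.lower s).length := by
      by_contra h
      rw [List.drop_eq_nil_of_le (by omega)] at hj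
      exact lowered_ne_nil kw hkw (List.prefix_nil.mp hj)
    exact ⟨j, hjlt, _, ⟨kw, hkw, rfl⟩, hj⟩
  · rintro ⟨i, _, _, ⟨kw, hkw, rfl⟩, hpre⟩
    exact ⟨kw, hkw, hpre.isInfix.trans (List.drop_suffix _ _).isInfix⟩

-- ===== VERDICT (by name: the statement is the Claim_ definition above) =====
theorem is_team_or_garbage_spec : Claim_equal_is_team_or_garbage := by
  intro stat_name _
  unfold Spec_is_team_or_garbage is_team_or_garbage is_team_or_garbage_alt
  by_cases h1 : (PySem.Chars.strip stat_name.toList == []) = true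
  · simp [h1]
  · rw [Bool.not_eq_true] at h1
    simp [h1, scan_eq, Bool.or_assoc]
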